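-- pv_equiv track=rewrite | github.com/DarkTXYZ/thesis-experiment | Dataset/preprocess.py | reindex_edges
-- ===== SOURCE A (Python) =====
-- def reindex_edges(edges):
--     """Reindex vertices to be 0-indexed and consecutive"""
--     # Check for self-loops and duplicate edges
--     edge_set = set()
--     for u, v in edges:
--         # Check for self-loop
--         if u == v:
--             raise ValueError(f"Self-loop found: {u} - {v}")
--
--         # Normalize edge (treat as undirected by sorting)
--         edge_tuple = tuple(sorted([u, v]))
--         if edge_tuple in edge_set:
--             raise ValueError(f"Duplicate edge found: {u} - {v}")
--         edge_set.add(edge_tuple)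
--
--     # Find all unique vertices
--     vertices = set()
--     for u, v in edges:
--         vertices.add(u)
--         vertices.add(v)
--
--     # Check if graph is connected using Union-Find
--     parent = {v: v for v in vertices}
--
--     def find(x):
--         if parent[x] != x:
--             parent[x] = find(parent[x])
--         return parent[x]
--
--     def union(x, y):
--         root_x = find(x)
--         root_y = find(y)
--         if root_x != root_y:
--             parent[root_x] = root_y
--
--     # Union all edges
--     for u, v in edges:
--         union(u, v)
--
--     # Check if all vertices have the same root (connected)
--     roots = set(find(v) for v in vertices)
--     if len(roots) > 1:
--         raise ValueError(f"Graph is not connected: {len(roots)} connected components found")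
--
--     # Create mapping from old to new indices
--     old_to_new = {old_id: new_id for new_id, old_id in enumerate(sorted(vertices))}
--
--     # Reindex edges
--     reindexed_edges = [(old_to_new[u], old_to_new[v]) for u, v in edges]
--
--     num_vertices = len(vertices)
--     num_edges = len(reindexed_edges)
--
--     return num_vertices, num_edges, reindexed_edges
-- ===== SOURCE B (Python) =====
-- def reindex_edges(edges):
--     """Reindex vertices to be 0-indexed and consecutive"""
--     seen = set()
--     adj = {}
--     for u, v in edges:
--         if u == v:
--             raise ValueError(f"Self-loop found: {u} - {v}")
--         e = (u, v) if u < v else (v, u)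
--         if e in seen:
--             raise ValueError(f"Duplicate edge found: {u} - {v}")
--         seen.add(e)
--         adj.setdefault(u, []).append(v)
--         adj.setdefault(v, []).append(u)
--     # connectivity via depth-first flood fill over the adjacency lists
--     components = 0
--     visited = set()
--     for s in adj:
--         if s not in visited:
--             components += 1
--             visited.add(s)
--             stack = [s]
--             while stack:
--                 x = stack.pop()
--                 for y in adj[x]:
--                     if y not in visited:
--                         visited.add(y)
--                         stack.append(y)
--     if components > 1:
--         raise ValueError(f"Graph is not connected: {components} connected components found")
--     verts = sorted(adj)
--     old_to_new = {old_id: new_id for new_id, old_id in enumerate(verts)}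
--     reindexed_edges = [(old_to_new[u], old_to_new[v]) for u, v in edges]
--     return len(verts), len(edges), reindexed_edges
-- ===== Notes on version B (the rewrite author's own statement) =====
-- stated objective: idiomatic
-- what changed: Replaced the union-find-with-path-compression connectivity check by an adjacency-list depth-first flood fill that counts components, and the vertex set is collected as the adjacency dict's keys during the single validation pass instead of a second pass over the edges.
import Mathlib
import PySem

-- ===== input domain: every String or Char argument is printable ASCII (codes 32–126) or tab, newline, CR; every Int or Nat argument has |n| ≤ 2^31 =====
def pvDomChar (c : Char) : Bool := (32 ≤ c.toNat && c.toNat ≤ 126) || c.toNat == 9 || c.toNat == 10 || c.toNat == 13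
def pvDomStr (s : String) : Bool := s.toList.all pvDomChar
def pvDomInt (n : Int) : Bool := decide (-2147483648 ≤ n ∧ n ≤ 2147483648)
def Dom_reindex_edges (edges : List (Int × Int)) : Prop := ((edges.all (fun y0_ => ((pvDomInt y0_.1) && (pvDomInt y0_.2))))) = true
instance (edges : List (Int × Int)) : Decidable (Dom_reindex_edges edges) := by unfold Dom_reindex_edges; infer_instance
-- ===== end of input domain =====

-- B replaces A's union-find connectivity check by an adjacency-list DFS flood fill and collects
-- the vertex set during the validation pass (objective: idiomatic). On inputs where the Python A
-- raises ValueError (self-loop, duplicate edge, disconnected graph) B raises too; those inputs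
-- are outside Pre_ and the ports return the dummy (0, 0, []) there.

-- ===== PORT A =====
-- tuple(sorted([u, v]))
def pvNormA (u v : Int) : Int × Int :=
  match PySem.List.sorted [u, v] (fun x => x) false with
  | [a, b] => (a, b)
  | _ => (0, 0)

-- first loop of A: self-loop / duplicate-edge detection (False = raise)
def pvCheckA : List (Int × Int) → PySem.Set (Int × Int) → Bool
  | [], _ => true
  | p :: rest, es =>
    if p.1 = p.2 then false
    else
      let t := pvNormA p.1 p.2
      if t ∈ es then false else pvCheckA rest (PySem.Set.add es t)

-- find with path compression; fuel bounds the recursion depth (chains have length ≤ #unions,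
-- so fuel = edges.length + 1 is always enough; proved via the pvStab invariant below)
def pvFindA : Nat → PySem.Dict Int Int → Int → Int × PySem.Dict Int Int
  | 0, d, x => (x, d)
  | fuel+1, d, x =>
    let p := d.getD x x
    if p = x then (x, d)
    else
      let rd := pvFindA fuel d p
      (rd.1, rd.2.insert x rd.1)

def pvUnionA (F : Nat) (d : PySem.Dict Int Int) (u v : Int) : PySem.Dict Int Int :=
  let r1 := pvFindA F d u
  let r2 := pvFindA F r1.2 v
  if r1.1 ≠ r2.1 then r2.2.insert r1.1 r2.1 else r2.2

def reindex_edges (edges : List (Int × Int)) : Int × Int × (List (Int × Int)) :=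
  if pvCheckA edges PySem.Set.empty = false then (0, 0, [])  -- ValueError: outside Pre_
  else
    let vertices : PySem.Set Int :=
      edges.foldl (fun s p => PySem.Set.add (PySem.Set.add s p.1) p.2) PySem.Set.empty
    let F := edges.length + 1
    let parent : PySem.Dict Int Int := vertices.foldl (fun d v => d.insert v v) PySem.Dict.empty
    let dF := edges.foldl (fun d p => pvUnionA F d p.1 p.2) parent
    let roots := vertices.foldl
      (fun (st : PySem.Set Int × PySem.Dict Int Int) v =>
        let rd := pvFindA F st.2 v
        (PySem.Set.add st.1 rd.1, rd.2)) (PySem.Set.empty, dF)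
    if roots.1.length > 1 then (0, 0, [])  -- ValueError: outside Pre_
    else
      let sortedV := PySem.List.sorted vertices (fun x => x) false
      let o2n : PySem.Dict Int Int := (sortedV.foldl
        (fun (st : PySem.Dict Int Int × Int) v => (st.1.insert v st.2, st.2 + 1))
        (PySem.Dict.empty, 0)).1
      let reindexed := edges.map (fun p => (o2n.getD p.1 0, o2n.getD p.2 0))
      ((vertices.length : Int), (reindexed.length : Int), reindexed)

-- ===== PORT B =====
-- adj.setdefault(u, []).append(v); adj.setdefault(v, []).append(u)
def pvAdjStep (adj : PySem.Dict Int (List Int)) (p : Int × Int) : PySem.Dict Int (List Int) :=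
  let a1 := adj.insert p.1 (adj.getD p.1 [] ++ [p.2])
  a1.insert p.2 (a1.getD p.2 [] ++ [p.1])

-- B's single validation pass: none = raise, some adj = the adjacency lists
def pvBuildB : List (Int × Int) → PySem.Set (Int × Int) → PySem.Dict Int (List Int) →
    Option (PySem.Dict Int (List Int))
  | [], _, adj => some adj
  | p :: rest, seen, adj =>
    if p.1 = p.2 then none
    else
      let e := if p.1 < p.2 then (p.1, p.2) else (p.2, p.1)
      if e ∈ seen then none
      else pvBuildB rest (PySem.Set.add seen e) (pvAdjStep adj p)

-- the while-stack flood fill; the list head is the Python stack's top (append/pop at the end);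
-- fuel = 2*#vertices+2 always exceeds the 2*|unvisited|+|stack| measure, so the stack empties
def pvDfsB (adj : PySem.Dict Int (List Int)) : Nat → List Int → PySem.Set Int → PySem.Set Int
  | _, [], vis => vis
  | 0, _ :: _, vis => vis
  | fuel+1, x :: stack, vis =>
    let st := (adj.getD x []).foldl
      (fun (st : PySem.Set Int × List Int) y =>
        if y ∈ st.1 then st else (PySem.Set.add st.1 y, y :: st.2)) (vis, stack)
    pvDfsB adj fuel st.2 st.1

def reindex_edges_alt (edges : List (Int × Int)) : Int × Int × (List (Int × Int)) :=
  match pvBuildB edges PySem.Set.empty PySem.Dict.empty with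
  | none => (0, 0, [])  -- ValueError (self-loop / duplicate): outside Pre_
  | some adj =>
    let fuel := 2 * adj.keys.length + 2
    let cv := adj.keys.foldl
      (fun (st : Int × PySem.Set Int) s =>
        if s ∈ st.2 then st
        else (st.1 + 1, pvDfsB adj fuel [s] (PySem.Set.add st.2 s))) (0, PySem.Set.empty)
    if cv.1 > 1 then (0, 0, [])  -- ValueError (disconnected): outside Pre_
    else
      let verts := PySem.List.sorted adj.keys (fun x => x) false
      let o2n : PySem.Dict Int Int := (verts.foldl
        (fun (st : PySem.Dict Int Int × Int) v => (st.1.insert v st.2, st.2 + 1))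
        (PySem.Dict.empty, 0)).1
      ((verts.length : Int), (edges.length : Int),
        edges.map (fun p => (o2n.getD p.1 0, o2n.getD p.2 0)))

-- ===== PRECONDITION & SPEC =====
-- the distinct vertices in order of first occurrence
def pvVerts (edges : List (Int × Int)) : List Int :=
  PySem.Set.ofList (edges.flatMap (fun p => [p.1, p.2]))

-- one step of the reachability closure: vertices already in S or adjacent to S
def pvStepR (edges : List (Int × Int)) (V S : List Int) : List Int :=
  V.filter (fun v => decide (v ∈ S) ||
    edges.any (fun p => (decide (p.1 = v) && decide (p.2 ∈ S)) ||
                        (decide (p.2 = v) && decide (p.1 ∈ S))))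

def pvClosure (edges : List (Int × Int)) : Nat → List Int → List Int
  | 0, S => S
  | k+1, S => pvClosure edges k (pvStepR edges (pvVerts edges) S)

-- Pre_ excludes exactly the inputs on which A raises ValueError: a self-loop, a duplicate
-- (undirected) edge, or a graph that is not connected (B raises there as well).
def Pre_reindex_edges (edges : List (Int × Int)) : Prop :=
  (∀ p ∈ edges, p.1 ≠ p.2) ∧
  (edges.map (fun p => (min p.1 p.2, max p.1 p.2))).Nodup ∧
  (∀ v ∈ pvVerts edges, v ∈ pvClosure edges (pvVerts edges).length [(pvVerts edges).headD 0])

instance (edges : List (Int × Int)) : Decidable (Pre_reindex_edges edges) := by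
  unfold Pre_reindex_edges; infer_instance

def pvWitness_reindex_edges : (List (Int × Int)) := [(1, 2), (2, 3)]

def Spec_reindex_edges (edges : List (Int × Int)) (out : Int × Int × (List (Int × Int))) : Prop :=
  out = reindex_edges_alt edges
instance (edges : List (Int × Int)) (out : Int × Int × (List (Int × Int))) :
    Decidable (Spec_reindex_edges edges out) := by unfold Spec_reindex_edges; infer_instance

-- ===== CLAIM (what is proved, stated in full; the proofs are below) =====
def Claim_equal_reindex_edges : Prop := ∀ (edges : List (Int × Int)),
  Dom_reindex_edges edges → Pre_reindex_edges edges →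
  Spec_reindex_edges edges (reindex_edges edges)

-- ===== LEMMAS AND PROOFS =====

-- ---- union-find machinery: iterates of the parent map ----
def pvF (d : PySem.Dict Int Int) (x : Int) : Int := d.getD x x

def pvIter (d : PySem.Dict Int Int) : Nat → Int → Int
  | 0, x => x
  | n+1, x => pvIter d n (pvF d x)

-- every chain reaches a fixpoint within n steps
def pvStab (n : Nat) (d : PySem.Dict Int Int) : Prop :=
  ∀ x, pvF d (pvIter d n x) = pvIter d n x

theorem pvIter_add (d : PySem.Dict Int Int) (a b : Nat) (x : Int) :
    pvIter d (a + b) x = pvIter d b (pvIter d a x) := by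
  induction a generalizing x with
  | zero => simp [pvIter]
  | succ a ih =>
    have h : a + 1 + b = (a + b) + 1 := by omega
    rw [h]
    show pvIter d (a + b) (pvF d x) = pvIter d b (pvIter d a (pvF d x))
    exact ih (pvF d x)

theorem pvIter_fix {d : PySem.Dict Int Int} {x : Int} (h : pvF d x = x) (n : Nat) :
    pvIter d n x = x := by
  induction n with
  | zero => rfl
  | succ n ih => show pvIter d n (pvF d x) = x; rw [h]; exact ih

theorem pvIter_stab_ge {d : PySem.Dict Int Int} {j : Nat} {x : Int}
    (h : pvF d (pvIter d j x) = pvIter d j x) {m : Nat} (hm : j ≤ m) :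
    pvIter d m x = pvIter d j x := by
  obtain ⟨k, rfl⟩ := Nat.le.dest hm
  rw [pvIter_add]; exact pvIter_fix h k

theorem pvStab_mono {n m : Nat} {d : PySem.Dict Int Int} (h : pvStab n d) (hnm : n ≤ m) :
    pvStab m d := by
  intro x
  rw [pvIter_stab_ge (h x) hnm]
  exact h x

theorem pvF_insert (d : PySem.Dict Int Int) (a b x : Int) :
    pvF (d.insert a b) x = if x = a then b else pvF d x := by
  simp [pvF, PySem.Dict.getD_insert]

-- path compression: pointing a at its root changes no root and keeps stabilization
theorem pvComp_main {n : Nat} {d : PySem.Dict Int Int} (hst : pvStab n d) (a : Int) :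
    ∀ j x m, pvF d (pvIter d j x) = pvIter d j x → j ≤ m →
      pvIter (d.insert a (pvIter d n a)) m x = pvIter d m x := by
  intro j
  induction j with
  | zero =>
    intro x m hfix hm
    simp only [pvIter] at hfix
    by_cases hxa : x = a
    · subst hxa
      have hra : pvIter d n x = x := pvIter_fix hfix n
      rw [hra]
      have hfix' : pvF (d.insert x x) x = x := by rw [pvF_insert]; simp
      rw [pvIter_fix hfix' m, pvIter_fix hfix m]
    · have hfix' : pvF (d.insert a (pvIter d n a)) x = x := by
        rw [pvF_insert]; simp [hxa]; exact hfix
      rw [pvIter_fix hfix' m, pvIter_fix hfix m]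
  | succ j ih =>
    intro x m hfix hm
    by_cases hfx : pvF d x = x
    · have hfixj : pvF d (pvIter d j x) = pvIter d j x := by rw [pvIter_fix hfx j]; exact hfx
      exact ih x m hfixj (by omega)
    · by_cases hxa : x = a
      · subst hxa
        -- x = a, not a fixpoint
        obtain ⟨m', rfl⟩ : ∃ m', m = m' + 1 := ⟨m - 1, by omega⟩
        set r := pvIter d n x with hr
        have hrfix : pvF d r = r := hst x
        have hrfix' : pvF (d.insert x r) r = r := by
          rw [pvF_insert]; split
          · next h => rw [h]
          · exact hrfix
        have h1 : pvIter (d.insert x r) (m' + 1) x = r := by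
          show pvIter (d.insert x r) m' (pvF (d.insert x r) x) = r
          rw [pvF_insert]; simp only [if_pos]
          exact pvIter_fix hrfix' m'
        rw [h1]
        -- pvIter d (m'+1) x = r
        have h2 : pvIter d (m' + 1) x = pvIter d (j + 1) x := pvIter_stab_ge hfix hm
        have h3 : pvIter d (max (j + 1) n) x = pvIter d (j + 1) x :=
          pvIter_stab_ge hfix (le_max_left _ _)
        have h4 : pvIter d (max (j + 1) n) x = pvIter d n x :=
          pvIter_stab_ge (hst x) (le_max_right _ _)
        rw [h2, ← h3, h4]
      · obtain ⟨m', rfl⟩ : ∃ m', m = m' + 1 := ⟨m - 1, by omega⟩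
        have hL : pvIter (d.insert a (pvIter d n a)) (m' + 1) x
            = pvIter (d.insert a (pvIter d n a)) m' (pvF d x) := by
          show pvIter _ m' (pvF (d.insert a (pvIter d n a)) x) = _
          rw [pvF_insert]; simp [hxa]
        have hfixp : pvF d (pvIter d j (pvF d x)) = pvIter d j (pvF d x) := hfix
        rw [hL]
        show pvIter _ m' (pvF d x) = pvIter d m' (pvF d x)
        exact ih (pvF d x) m' hfixp (by omega)

theorem pvComp_pres {n : Nat} {d : PySem.Dict Int Int} (hst : pvStab n d) (a : Int) :
    ∀ x, pvIter (d.insert a (pvIter d n a)) n x = pvIter d n x := by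
  intro x
  exact pvComp_main hst a n x n (hst x) le_rfl

theorem pvComp_stab {n : Nat} {d : PySem.Dict Int Int} (hst : pvStab n d) (a : Int) :
    pvStab n (d.insert a (pvIter d n a)) := by
  intro x
  rw [pvComp_pres hst a x]
  rw [pvF_insert]
  split
  · next h =>
    have hfa : pvF d a = a := by have := hst x; rwa [h] at this
    rw [h, pvIter_fix hfa n]
  · exact hst x

-- linking root ra to root rb
theorem pvLink_main {n : Nat} {d : PySem.Dict Int Int} (_hst : pvStab n d) {ra rb : Int}
    (hra : pvF d ra = ra) (hrb : pvF d rb = rb) (hne : ra ≠ rb) :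
    ∀ j x m, pvF d (pvIter d j x) = pvIter d j x → j + 1 ≤ m →
      pvIter (d.insert ra rb) m x = (if pvIter d j x = ra then rb else pvIter d j x) := by
  have hrbfix : pvF (d.insert ra rb) rb = rb := by
    rw [pvF_insert]; simp [Ne.symm hne]; exact hrb
  intro j
  induction j with
  | zero =>
    intro x m hfix hm
    simp only [pvIter] at hfix ⊢
    by_cases hxa : x = ra
    · subst hxa
      simp only [if_pos]
      obtain ⟨m', rfl⟩ : ∃ m', m = m' + 1 := ⟨m - 1, by omega⟩
      show pvIter (d.insert x rb) m' (pvF (d.insert x rb) x) = rb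
      rw [pvF_insert]; simp only [if_pos]
      exact pvIter_fix hrbfix m'
    · simp only [if_neg hxa]
      have hfix' : pvF (d.insert ra rb) x = x := by
        rw [pvF_insert]; simp [hxa]; exact hfix
      exact pvIter_fix hfix' m
  | succ j ih =>
    intro x m hfix hm
    by_cases hfx : pvF d x = x
    · have hj : pvIter d j x = x := pvIter_fix hfx j
      have h0 := ih x m (by rw [hj]; exact hfx) (by omega)
      have he : pvIter d (j + 1) x = x := pvIter_fix hfx (j + 1)
      rw [he]
      rw [hj] at h0
      exact h0
    · have hxa : x ≠ ra := by
        intro h; subst h; exact hfx hra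
      obtain ⟨m', rfl⟩ : ∃ m', m = m' + 1 := ⟨m - 1, by omega⟩
      have hL : pvIter (d.insert ra rb) (m' + 1) x
          = pvIter (d.insert ra rb) m' (pvF d x) := by
        show pvIter _ m' (pvF (d.insert ra rb) x) = _
        rw [pvF_insert]; simp [hxa]
      rw [hL]
      have hfixp : pvF d (pvIter d j (pvF d x)) = pvIter d j (pvF d x) := hfix
      have := ih (pvF d x) m' hfixp (by omega)
      rw [this]
      rfl

theorem pvLink_root {n : Nat} {d : PySem.Dict Int Int} (hst : pvStab n d) {ra rb : Int}
    (hra : pvF d ra = ra) (hrb : pvF d rb = rb) (hne : ra ≠ rb) (x : Int) :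
    pvIter (d.insert ra rb) (n + 1) x = (if pvIter d n x = ra then rb else pvIter d n x) :=
  pvLink_main hst hra hrb hne n x (n + 1) (hst x) le_rfl

theorem pvLink_stab {n : Nat} {d : PySem.Dict Int Int} (hst : pvStab n d) {ra rb : Int}
    (hra : pvF d ra = ra) (hrb : pvF d rb = rb) (hne : ra ≠ rb) :
    pvStab (n + 1) (d.insert ra rb) := by
  intro x
  rw [pvLink_root hst hra hrb hne x]
  split
  · rw [pvF_insert]; simp [Ne.symm hne]; exact hrb
  · next h =>
    rw [pvF_insert]; simp [h]; exact hst x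

-- find: returns the root, preserves all roots (despite compression), keeps stabilization
theorem pvFind_spec {n : Nat} {d : PySem.Dict Int Int} (hst : pvStab n d) :
    ∀ j x fuel, j ≤ n → pvF d (pvIter d j x) = pvIter d j x → j < fuel →
      (pvFindA fuel d x).1 = pvIter d n x ∧
      (∀ y, pvIter (pvFindA fuel d x).2 n y = pvIter d n y) ∧
      pvStab n (pvFindA fuel d x).2 := by
  intro j
  induction j with
  | zero =>
    intro x fuel _ hfix hfuel
    simp only [pvIter] at hfix
    obtain ⟨f, rfl⟩ : ∃ f, fuel = f + 1 := ⟨fuel - 1, by omega⟩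
    have e : pvFindA (f + 1) d x = (x, d) := by
      simp only [pvFindA]
      rw [if_pos (show d.getD x x = x from hfix)]
    rw [e]
    exact ⟨(pvIter_fix hfix n).symm, fun y => rfl, hst⟩
  | succ j ih =>
    intro x fuel hjn hfix hfuel
    obtain ⟨f, rfl⟩ : ∃ f, fuel = f + 1 := ⟨fuel - 1, by omega⟩
    by_cases hfx : pvF d x = x
    · have e : pvFindA (f + 1) d x = (x, d) := by
        simp only [pvFindA]
        rw [if_pos (show d.getD x x = x from hfx)]
      rw [e]
      exact ⟨(pvIter_fix hfx n).symm, fun y => rfl, hst⟩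
    · have e : pvFindA (f + 1) d x =
          ((pvFindA f d (pvF d x)).1,
            (pvFindA f d (pvF d x)).2.insert x (pvFindA f d (pvF d x)).1) := by
        simp only [pvFindA]
        rw [if_neg (show ¬ d.getD x x = x from hfx)]
        rfl
      have hfixp : pvF d (pvIter d j (pvF d x)) = pvIter d j (pvF d x) := hfix
      obtain ⟨ih1, ih2, ih3⟩ := ih (pvF d x) f (by omega) hfixp (by omega)
      have hroot : pvIter d n x = pvIter d n (pvF d x) := by
        have h1 : pvIter d n x = pvIter d (j + 1) x := pvIter_stab_ge hfix hjn
        have h3 : pvIter d n (pvF d x) = pvIter d j (pvF d x) :=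
          pvIter_stab_ge hfixp (by omega)
        rw [h1, h3]; rfl
      rw [e]
      set rd := pvFindA f d (pvF d x) with hrd
      have hr1 : rd.1 = pvIter rd.2 n x := by
        rw [ih1, ih2 x, ← hroot]
      refine ⟨?_, ?_, ?_⟩
      · show rd.1 = pvIter d n x
        rw [ih1, hroot]
      · intro y
        show pvIter (rd.2.insert x rd.1) n y = pvIter d n y
        rw [hr1, pvComp_pres ih3 x y, ih2 y]
      · show pvStab n (rd.2.insert x rd.1)
        rw [hr1]
        exact pvComp_stab ih3 x

-- union: keeps stabilization (one level up), preserves root equalities, merges u and v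
theorem pvUnion_spec {n : Nat} {d : PySem.Dict Int Int} (hst : pvStab n d) {F : Nat}
    (hF : n < F) (u v : Int) :
    pvStab (n + 1) (pvUnionA F d u v) ∧
    (∀ y z, pvIter d n y = pvIter d n z →
      pvIter (pvUnionA F d u v) (n + 1) y = pvIter (pvUnionA F d u v) (n + 1) z) ∧
    pvIter (pvUnionA F d u v) (n + 1) u = pvIter (pvUnionA F d u v) (n + 1) v := by
  obtain ⟨h11, h12, h13⟩ := pvFind_spec hst n u F le_rfl (hst u) hF
  obtain ⟨h21, h22, h23⟩ := pvFind_spec h13 n v F le_rfl (h13 v) hF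
  set r1 := pvFindA F d u with hr1def
  set r2 := pvFindA F r1.2 v with hr2def
  have h21' : r2.1 = pvIter d n v := by rw [h21, h12]
  have hpres : ∀ y, pvIter r2.2 n y = pvIter d n y := fun y => by rw [h22 y, h12 y]
  have hUnf : pvUnionA F d u v = if r1.1 ≠ r2.1 then r2.2.insert r1.1 r2.1 else r2.2 := rfl
  by_cases hrr : r1.1 = r2.1
  · rw [hUnf, if_neg (by simpa using hrr)]
    have hroot1 : ∀ y, pvIter r2.2 (n + 1) y = pvIter d n y := fun y => by
      rw [pvIter_stab_ge (h23 y) (Nat.le_succ n), hpres y]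
    refine ⟨pvStab_mono h23 (Nat.le_succ n), ?_, ?_⟩
    · intro y z h; rw [hroot1 y, hroot1 z]; exact h
    · rw [hroot1 u, hroot1 v, ← h11, ← h21', hrr]
  · rw [hUnf, if_pos (by simpa using hrr)]
    have hrafix : pvF r2.2 r1.1 = r1.1 := by
      have := h23 u
      rw [hpres u, ← h11] at this
      exact this
    have hrbfix : pvF r2.2 r2.1 = r2.1 := by
      have := h23 v
      rw [hpres v, ← h21'] at this
      exact this
    have hlink := pvLink_root h23 hrafix hrbfix hrr
    have hroot : ∀ y, pvIter (r2.2.insert r1.1 r2.1) (n + 1) y =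
        (if pvIter d n y = r1.1 then r2.1 else pvIter d n y) := fun y => by
      rw [hlink y, hpres y]
    refine ⟨pvLink_stab h23 hrafix hrbfix hrr, ?_, ?_⟩
    · intro y z h; rw [hroot y, hroot z, h]
    · rw [hroot u, hroot v, ← h11, ← h21']
      rw [if_pos rfl]
      split <;> rfl

-- folding union over the edge list: roots of processed edges coincide
theorem pvFold_spec (F : Nat) : ∀ (rest : List (Int × Int)) (d : PySem.Dict Int Int) (i : Nat),
    pvStab i d → i + rest.length < F →
    pvStab (i + rest.length) (rest.foldl (fun d p => pvUnionA F d p.1 p.2) d) ∧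
    (∀ y z, pvIter d i y = pvIter d i z →
      pvIter (rest.foldl (fun d p => pvUnionA F d p.1 p.2) d) (i + rest.length) y =
      pvIter (rest.foldl (fun d p => pvUnionA F d p.1 p.2) d) (i + rest.length) z) ∧
    (∀ p ∈ rest,
      pvIter (rest.foldl (fun d p => pvUnionA F d p.1 p.2) d) (i + rest.length) p.1 =
      pvIter (rest.foldl (fun d p => pvUnionA F d p.1 p.2) d) (i + rest.length) p.2) := by
  intro rest
  induction rest with
  | nil =>
    intro d i hst _
    refine ⟨by simpa using hst, ?_, by simp⟩
    intro y z h; simpa using h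
  | cons p rest ih =>
    intro d i hst hF
    obtain ⟨hu1, hu2, hu3⟩ := pvUnion_spec hst (show i < F by simp at hF; omega) p.1 p.2
    obtain ⟨ihA, ihB, ihC⟩ := ih (pvUnionA F d p.1 p.2) (i + 1) hu1 (by simp at hF ⊢; omega)
    have harith : i + 1 + rest.length = i + (p :: rest).length := by simp; omega
    rw [harith] at ihA ihB ihC
    simp only [List.foldl_cons]
    refine ⟨ihA, ?_, ?_⟩
    · intro y z h
      exact ihB y z (hu2 y z h)
    · intro q hq
      rcases List.mem_cons.mp hq with h | h
      · subst h; exact ihB q.1 q.2 hu3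
      · exact ihC q h

-- the initial parent dict {v: v} is the identity
theorem pvParent_id : ∀ (l : List Int) (d : PySem.Dict Int Int),
    (∀ x, pvF d x = x) → ∀ x, pvF (l.foldl (fun d v => d.insert v v) d) x = x := by
  intro l
  induction l with
  | nil => intro d h; exact h
  | cons v l ih =>
    intro d h x
    simp only [List.foldl_cons]
    refine ih (d.insert v v) ?_ x
    intro y
    rw [pvF_insert]
    split
    · next hy => rw [hy]
    · exact h y

-- ---- A-side glue ----
theorem pvNormA_eq (u v : Int) : pvNormA u v = (min u v, max u v) := by
  unfold pvNormA
  rcases le_or_gt u v with h | h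
  · rw [show PySem.List.sorted [u, v] (fun x => x) false = [u, v] from ?_]
    · simp [min_eq_left h, max_eq_right h]
    · simp [PySem.List.sorted, PySem.List.insertBy, not_lt.mpr h]
  · rw [show PySem.List.sorted [u, v] (fun x => x) false = [v, u] from ?_]
    · simp [min_eq_right h.le, max_eq_left h.le]
    · simp [PySem.List.sorted, PySem.List.insertBy, h]

theorem pvCheckA_true : ∀ (l : List (Int × Int)) (s : PySem.Set (Int × Int)),
    (∀ p ∈ l, p.1 ≠ p.2) → (l.map (fun p => (min p.1 p.2, max p.1 p.2))).Nodup →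
    (∀ p ∈ l, (min p.1 p.2, max p.1 p.2) ∉ s) → pvCheckA l s = true := by
  intro l
  induction l with
  | nil => intro s _ _ _; rfl
  | cons p l ih =>
    intro s hself hnd hnot
    have hp : p.1 ≠ p.2 := hself p (List.mem_cons_self)
    show pvCheckA (p :: l) s = true
    simp only [pvCheckA]
    rw [if_neg hp, pvNormA_eq]
    rw [if_neg (hnot p (List.mem_cons_self))]
    have hnd' := List.nodup_cons.mp
      (show ((min p.1 p.2, max p.1 p.2) ::
          l.map (fun p => (min p.1 p.2, max p.1 p.2))).Nodup by simpa using hnd)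
    apply ih
    · exact fun q hq => hself q (List.mem_cons_of_mem p hq)
    · exact hnd'.2
    · intro q hq
      rw [PySem.Set.mem_add]
      rintro (h | h)
      · exact hnot q (List.mem_cons_of_mem p hq) h
      · exact hnd'.1 (by
          rw [← h]
          exact List.mem_map.mpr ⟨q, hq, rfl⟩)

-- the vertex-set loop is Set.ofList of the flattened endpoint list
theorem pvVertsFold : ∀ (l : List (Int × Int)) (s : PySem.Set Int),
    (l.flatMap (fun p => [p.1, p.2])).foldl PySem.Set.add s =
      l.foldl (fun s p => PySem.Set.add (PySem.Set.add s p.1) p.2) s := by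
  intro l
  induction l with
  | nil => intro s; rfl
  | cons p l ih => intro s; simp only [List.flatMap_cons, List.foldl_cons, List.foldl_append]; exact ih _

theorem pvVerts_eq (edges : List (Int × Int)) :
    pvVerts edges = edges.foldl (fun s p => PySem.Set.add (PySem.Set.add s p.1) p.2) PySem.Set.empty := by
  rw [pvVerts, PySem.Set.ofList_eq_foldl, pvVertsFold]
  rfl

theorem pvVerts_mem (edges : List (Int × Int)) (x : Int) :
    x ∈ pvVerts edges ↔ ∃ p ∈ edges, x = p.1 ∨ x = p.2 := by
  rw [pvVerts, PySem.Set.mem_ofList, List.mem_flatMap]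
  constructor
  · rintro ⟨p, hp, hx⟩
    exact ⟨p, hp, by simpa using hx⟩
  · rintro ⟨p, hp, hx⟩
    exact ⟨p, hp, by simpa using hx⟩

-- closure transfer: a property that respects every edge and holds on S holds on the closure
theorem pvClosure_pred {edges : List (Int × Int)} (P : Int → Prop)
    (hedge : ∀ p ∈ edges, (P p.1 ↔ P p.2)) :
    ∀ k (S : List Int), (∀ s ∈ S, P s) → ∀ v ∈ pvClosure edges k S, P v := by
  intro k
  induction k with
  | zero => intro S hS v hv; exact hS v hv
  | succ k ih =>
    intro S hS v hv
    refine ih _ ?_ v hv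
    intro s hs
    rw [pvStepR, List.mem_filter] at hs
    obtain ⟨hsV, hcond⟩ := hs
    rw [Bool.or_eq_true, decide_eq_true_iff, List.any_eq_true] at hcond
    rcases hcond with h | ⟨p, hp, hpc⟩
    · exact hS s h
    · rw [Bool.or_eq_true, Bool.and_eq_true, Bool.and_eq_true,
        decide_eq_true_iff, decide_eq_true_iff, decide_eq_true_iff, decide_eq_true_iff] at hpc
      rcases hpc with ⟨h1, h2⟩ | ⟨h1, h2⟩
      · rw [← h1, hedge p hp]; exact hS _ h2
      · rw [← h1, ← (hedge p hp)]; exact hS _ h2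

-- the final loop set(find(v) for v in vertices) collects at most the single root c
theorem pvRoots_loop {F N : Nat} (hFN : N < F) {dF : PySem.Dict Int Int} {c : Int} :
    ∀ (l : List Int) (s : PySem.Set Int) (d : PySem.Dict Int Int),
      pvStab N d → (∀ y, pvIter d N y = pvIter dF N y) →
      (∀ v ∈ l, pvIter dF N v = c) → (s = [] ∨ s = [c]) →
      ((l.foldl (fun (st : PySem.Set Int × PySem.Dict Int Int) v =>
          (PySem.Set.add st.1 (pvFindA F st.2 v).1, (pvFindA F st.2 v).2)) (s, d)).1 = [] ∨
       (l.foldl (fun (st : PySem.Set Int × PySem.Dict Int Int) v =>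
          (PySem.Set.add st.1 (pvFindA F st.2 v).1, (pvFindA F st.2 v).2)) (s, d)).1 = [c]) := by
  intro l
  induction l with
  | nil => intro s d _ _ _ hs; exact hs
  | cons v l ih =>
    intro s d hst hpres hl hs
    obtain ⟨h1, h2, h3⟩ := pvFind_spec hst N v F le_rfl (hst v) hFN
    simp only [List.foldl_cons]
    have hr : (pvFindA F d v).1 = c := by
      rw [h1, hpres v, hl v List.mem_cons_self]
    rw [hr]
    apply ih
    · exact h3
    · intro y; rw [h2 y, hpres y]
    · exact fun w hw => hl w (List.mem_cons_of_mem v hw)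
    · rcases hs with hs | hs
      · subst hs
        right
        rw [PySem.Set.add_of_not_mem (by simp)]
        rfl
      · subst hs
        right
        rw [PySem.Set.add_of_mem (by simp)]

-- ---- B-side glue ----
theorem pvNormB_eq {u v : Int} (h : u ≠ v) :
    (if u < v then (u, v) else (v, u)) = (min u v, max u v) := by
  rcases lt_or_gt_of_ne h with hlt | hgt
  · rw [if_pos hlt, min_eq_left hlt.le, max_eq_right hlt.le]
  · rw [if_neg (by omega), min_eq_right hgt.le, max_eq_left hgt.le]

theorem pvBuildB_some : ∀ (l : List (Int × Int)) (seen : PySem.Set (Int × Int))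
    (adj : PySem.Dict Int (List Int)),
    (∀ p ∈ l, p.1 ≠ p.2) → (l.map (fun p => (min p.1 p.2, max p.1 p.2))).Nodup →
    (∀ p ∈ l, (min p.1 p.2, max p.1 p.2) ∉ seen) →
    pvBuildB l seen adj = some (l.foldl pvAdjStep adj) := by
  intro l
  induction l with
  | nil => intro seen adj _ _ _; rfl
  | cons p l ih =>
    intro seen adj hself hnd hnot
    have hp : p.1 ≠ p.2 := hself p (List.mem_cons_self)
    show pvBuildB (p :: l) seen adj = _
    simp only [pvBuildB]
    rw [if_neg hp, pvNormB_eq hp, if_neg (hnot p (List.mem_cons_self))]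
    have hnd' := List.nodup_cons.mp
      (show ((min p.1 p.2, max p.1 p.2) ::
          l.map (fun p => (min p.1 p.2, max p.1 p.2))).Nodup by simpa using hnd)
    rw [ih _ _ (fun q hq => hself q (List.mem_cons_of_mem p hq)) hnd'.2 ?_]
    · rfl
    · intro q hq
      rw [PySem.Set.mem_add]
      rintro (h | h)
      · exact hnot q (List.mem_cons_of_mem p hq) h
      · exact hnd'.1 (by
          rw [← h]
          exact List.mem_map.mpr ⟨q, hq, rfl⟩)

theorem pvAdjStep_getD (adj : PySem.Dict Int (List Int)) (p : Int × Int) (x : Int) :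
    (pvAdjStep adj p).getD x [] =
      if x = p.2 then
        (if p.2 = p.1 then adj.getD p.1 [] ++ [p.2] else adj.getD p.2 []) ++ [p.1]
      else if x = p.1 then adj.getD p.1 [] ++ [p.2]
      else adj.getD x [] := by
  show ((adj.insert p.1 (adj.getD p.1 [] ++ [p.2])).insert p.2
      ((adj.insert p.1 (adj.getD p.1 [] ++ [p.2])).getD p.2 [] ++ [p.1])).getD x [] = _
  rw [PySem.Dict.getD_insert, PySem.Dict.getD_insert, PySem.Dict.getD_insert]

theorem pvAdjStep_keys (adj : PySem.Dict Int (List Int)) (p : Int × Int)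
    (h : adj.keys.Nodup) :
    (pvAdjStep adj p).keys = PySem.Set.add (PySem.Set.add adj.keys p.1) p.2 ∧
    (pvAdjStep adj p).keys.Nodup := by
  have h1 : (adj.insert p.1 (adj.getD p.1 [] ++ [p.2])).keys = PySem.Set.add adj.keys p.1 := by
    by_cases hc : adj.contains p.1 = true
    · rw [PySem.Dict.keys_insert_of_contains _ _ hc,
        PySem.Set.add_of_mem ((PySem.Dict.contains_iff_mem_keys _ _).mp hc)]
    · rw [PySem.Dict.keys_insert_of_not_contains _ _ (by simpa using hc),
        PySem.Set.add_of_not_mem (fun hm => hc ((PySem.Dict.contains_iff_mem_keys _ _).mpr hm))]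
  have hn1 : (adj.insert p.1 (adj.getD p.1 [] ++ [p.2])).keys.Nodup :=
    PySem.Dict.nodup_keys_insert _ _ _ h
  set a1 := adj.insert p.1 (adj.getD p.1 [] ++ [p.2]) with ha1
  have h2 : (a1.insert p.2 (a1.getD p.2 [] ++ [p.1])).keys = PySem.Set.add a1.keys p.2 := by
    by_cases hc : a1.contains p.2 = true
    · rw [PySem.Dict.keys_insert_of_contains _ _ hc,
        PySem.Set.add_of_mem ((PySem.Dict.contains_iff_mem_keys _ _).mp hc)]
    · rw [PySem.Dict.keys_insert_of_not_contains _ _ (by simpa using hc),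
        PySem.Set.add_of_not_mem (fun hm => hc ((PySem.Dict.contains_iff_mem_keys _ _).mpr hm))]
  exact ⟨by rw [show (pvAdjStep adj p).keys = (a1.insert p.2 (a1.getD p.2 [] ++ [p.1])).keys from rfl,
      h2, h1],
    by rw [show (pvAdjStep adj p).keys = (a1.insert p.2 (a1.getD p.2 [] ++ [p.1])).keys from rfl]
       exact PySem.Dict.nodup_keys_insert _ _ _ hn1⟩

-- membership in adjacency lists is preserved and the new edge's endpoints are recorded
theorem pvAdjStep_sub (adj : PySem.Dict Int (List Int)) (p : Int × Int) (x y : Int)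
    (h : y ∈ adj.getD x []) : y ∈ (pvAdjStep adj p).getD x [] := by
  rw [pvAdjStep_getD]
  split
  · next hx =>
    subst hx
    split
    · next hx1 => rw [hx1] at h; simp [List.mem_append, h]
    · simp [List.mem_append, h]
  · split
    · next hx1 => rw [hx1] at h; simp [List.mem_append, h]
    · exact h

theorem pvAdjStep_self (adj : PySem.Dict Int (List Int)) (p : Int × Int) :
    p.2 ∈ (pvAdjStep adj p).getD p.1 [] ∧ p.1 ∈ (pvAdjStep adj p).getD p.2 [] := by
  constructor
  · rw [pvAdjStep_getD]
    by_cases h12 : p.1 = p.2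
    · rw [if_pos h12, if_pos h12.symm]
      simp
    · rw [if_neg h12, if_pos rfl]
      simp
  · rw [pvAdjStep_getD, if_pos rfl]
    simp

theorem pvFold_sub : ∀ (l : List (Int × Int)) (adj : PySem.Dict Int (List Int)) (x y : Int),
    y ∈ adj.getD x [] → y ∈ (l.foldl pvAdjStep adj).getD x [] := by
  intro l
  induction l with
  | nil => intro adj x y h; exact h
  | cons p l ih =>
    intro adj x y h
    simp only [List.foldl_cons]
    exact ih _ x y (pvAdjStep_sub adj p x y h)

theorem pvAdj_edge : ∀ (l : List (Int × Int)) (adj : PySem.Dict Int (List Int)) (p : Int × Int),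
    p ∈ l → p.2 ∈ (l.foldl pvAdjStep adj).getD p.1 [] ∧
            p.1 ∈ (l.foldl pvAdjStep adj).getD p.2 [] := by
  intro l
  induction l with
  | nil => intro adj p hp; cases hp
  | cons q l ih =>
    intro adj p hp
    simp only [List.foldl_cons]
    rcases List.mem_cons.mp hp with h | h
    · subst h
      have hself := pvAdjStep_self adj p
      constructor
      · exact pvFold_sub l _ _ _ hself.1
      · exact pvFold_sub l _ _ _ hself.2
    · exact ih _ p h

-- keys of the adjacency dict = the vertex-set fold; values stay inside the keys
theorem pvAdjFold_inv : ∀ (l : List (Int × Int)) (adj : PySem.Dict Int (List Int)),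
    adj.keys.Nodup → (∀ x y, y ∈ adj.getD x [] → y ∈ adj.keys) →
    (l.foldl pvAdjStep adj).keys =
      l.foldl (fun s p => PySem.Set.add (PySem.Set.add s p.1) p.2) adj.keys ∧
    (l.foldl pvAdjStep adj).keys.Nodup ∧
    (∀ x y, y ∈ (l.foldl pvAdjStep adj).getD x [] → y ∈ (l.foldl pvAdjStep adj).keys) := by
  intro l
  induction l with
  | nil => intro adj h hvals; exact ⟨rfl, h, hvals⟩
  | cons p l ih =>
    intro adj h hvals
    obtain ⟨hk, hkn⟩ := pvAdjStep_keys adj p h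
    have hvals' : ∀ x y, y ∈ (pvAdjStep adj p).getD x [] → y ∈ (pvAdjStep adj p).keys := by
      intro x y hy
      rw [hk, PySem.Set.mem_add, PySem.Set.mem_add]
      rw [pvAdjStep_getD] at hy
      split at hy
      · next hx =>
        rcases List.mem_append.mp hy with hy | hy
        · split at hy
          · rcases List.mem_append.mp hy with hy | hy
            · exact Or.inl (Or.inl (hvals _ _ hy))
            · exact Or.inr (by simpa using hy)
          · exact Or.inl (Or.inl (hvals _ _ hy))
        · exact Or.inl (Or.inr (by simpa using hy))
      · split at hy
        · rcases List.mem_append.mp hy with hy | hy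
          · exact Or.inl (Or.inl (hvals _ _ hy))
          · exact Or.inr (by simpa using hy)
        · exact Or.inl (Or.inl (hvals _ _ hy))
    obtain ⟨ih1, ih2, ih3⟩ := ih (pvAdjStep adj p) hkn hvals'
    simp only [List.foldl_cons]
    exact ⟨by rw [ih1, hk], ih2, ih3⟩

-- ---- DFS flood-fill machinery ----
def pvUnvis (V : List Int) (vis : List Int) : Nat :=
  (V.filter (fun v => !(decide (v ∈ vis)))).length

theorem pvUnvis_le (V vis : List Int) : pvUnvis V vis ≤ V.length :=
  List.length_filter_le _ _

theorem pvUnvis_add {V : List Int} (hV : V.Nodup) {y : Int} (hy : y ∈ V)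
    (vis : List Int) (hyv : y ∉ vis) :
    pvUnvis V (PySem.Set.add vis y) + 1 = pvUnvis V vis := by
  rw [PySem.Set.add_of_not_mem hyv]
  induction V with
  | nil => cases hy
  | cons a t ih =>
    have hnd := List.nodup_cons.mp hV
    by_cases hay : a = y
    · subst hay
      have hat : ∀ v ∈ t, (!(decide (v ∈ vis ++ [a]))) = (!(decide (v ∈ vis))) := by
        intro v hv
        have : v ≠ a := fun h => hnd.1 (h ▸ hv)
        simp [List.mem_append, this]
      rw [pvUnvis, pvUnvis, List.filter_cons, List.filter_cons]
      rw [if_neg (by simp), if_pos (by simpa using hyv)]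
      rw [List.filter_congr hat]
      simp
    · rcases List.mem_cons.mp hy with h | h
      · exact absurd h.symm hay
      · have ht := ih hnd.2 h
        rw [pvUnvis, pvUnvis, List.filter_cons, List.filter_cons]
        by_cases ha : a ∈ vis
        · rw [if_neg (by simp [List.mem_append, ha]), if_neg (by simpa using ha)]
          exact ht
        · rw [if_pos (by simp [List.mem_append, ha, hay]), if_pos (by simpa using ha)]
          simp only [List.length_cons]
          rw [pvUnvis, pvUnvis] at ht
          omega

-- the neighbor-push loop: what it does to visited, stack and the measure
theorem pvPush_spec {V : List Int} (hV : V.Nodup) :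
    ∀ (ys : List Int) (vis : PySem.Set Int) (stack : List Int), (∀ y ∈ ys, y ∈ V) →
      (∀ z ∈ vis, z ∈ (ys.foldl (fun (st : PySem.Set Int × List Int) y =>
          if y ∈ st.1 then st else (PySem.Set.add st.1 y, y :: st.2)) (vis, stack)).1) ∧
      (∀ z ∈ (ys.foldl (fun (st : PySem.Set Int × List Int) y =>
          if y ∈ st.1 then st else (PySem.Set.add st.1 y, y :: st.2)) (vis, stack)).1,
        z ∈ vis ∨ z ∈ ys) ∧
      (∀ y ∈ ys, y ∈ (ys.foldl (fun (st : PySem.Set Int × List Int) y =>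
          if y ∈ st.1 then st else (PySem.Set.add st.1 y, y :: st.2)) (vis, stack)).1) ∧
      (∀ z ∈ stack, z ∈ (ys.foldl (fun (st : PySem.Set Int × List Int) y =>
          if y ∈ st.1 then st else (PySem.Set.add st.1 y, y :: st.2)) (vis, stack)).2) ∧
      (∀ z ∈ (ys.foldl (fun (st : PySem.Set Int × List Int) y =>
          if y ∈ st.1 then st else (PySem.Set.add st.1 y, y :: st.2)) (vis, stack)).2,
        z ∈ stack ∨ z ∈ (ys.foldl (fun (st : PySem.Set Int × List Int) y =>
          if y ∈ st.1 then st else (PySem.Set.add st.1 y, y :: st.2)) (vis, stack)).1) ∧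
      (∀ z ∈ (ys.foldl (fun (st : PySem.Set Int × List Int) y =>
          if y ∈ st.1 then st else (PySem.Set.add st.1 y, y :: st.2)) (vis, stack)).1,
        z ∈ vis ∨ z ∈ (ys.foldl (fun (st : PySem.Set Int × List Int) y =>
          if y ∈ st.1 then st else (PySem.Set.add st.1 y, y :: st.2)) (vis, stack)).2) ∧
      (2 * pvUnvis V (ys.foldl (fun (st : PySem.Set Int × List Int) y =>
          if y ∈ st.1 then st else (PySem.Set.add st.1 y, y :: st.2)) (vis, stack)).1 +
        (ys.foldl (fun (st : PySem.Set Int × List Int) y =>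
          if y ∈ st.1 then st else (PySem.Set.add st.1 y, y :: st.2)) (vis, stack)).2.length ≤
        2 * pvUnvis V vis + stack.length) := by
  intro ys
  induction ys with
  | nil =>
    intro vis stack _
    exact ⟨fun z h => h, fun z h => Or.inl h, fun y h => absurd h (List.not_mem_nil),
      fun z h => h, fun z h => Or.inl h, fun z h => Or.inl h, le_rfl⟩
  | cons y ys ih =>
    intro vis stack hys
    simp only [List.foldl_cons]
    by_cases hyv : y ∈ vis
    · rw [if_pos hyv]
      obtain ⟨a, b, c, d, e, f, g⟩ := ih vis stack (fun w hw => hys w (List.mem_cons_of_mem y hw))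
      refine ⟨a, ?_, ?_, d, e, f, g⟩
      · exact fun z hz => (b z hz).imp id (List.mem_cons_of_mem y)
      · intro w hw
        rcases List.mem_cons.mp hw with h | h
        · subst h; exact a w hyv
        · exact c w h
    · rw [if_neg hyv]
      obtain ⟨a, b, c, d, e, f, g⟩ :=
        ih (PySem.Set.add vis y) (y :: stack) (fun w hw => hys w (List.mem_cons_of_mem y hw))
      have hyV : y ∈ V := hys y List.mem_cons_self
      refine ⟨?_, ?_, ?_, ?_, ?_, ?_, ?_⟩
      · exact fun z hz => a z ((PySem.Set.mem_add _ _ _).mpr (Or.inl hz))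
      · intro z hz
        rcases b z hz with h | h
        · rcases (PySem.Set.mem_add _ _ _).mp h with h | h
          · exact Or.inl h
          · exact Or.inr (h ▸ List.mem_cons_self)
        · exact Or.inr (List.mem_cons_of_mem y h)
      · intro w hw
        rcases List.mem_cons.mp hw with h | h
        · subst h; exact a w ((PySem.Set.mem_add _ _ _).mpr (Or.inr rfl))
        · exact c w h
      · exact fun z hz => d z (List.mem_cons_of_mem y hz)
      · intro z hz
        rcases e z hz with h | h
        · rcases List.mem_cons.mp h with h | h
          · subst h; exact Or.inr (a z ((PySem.Set.mem_add _ _ _).mpr (Or.inr rfl)))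
          · exact Or.inl h
        · exact Or.inr h
      · intro z hz
        rcases f z hz with h | h
        · rcases (PySem.Set.mem_add _ _ _).mp h with h | h
          · exact Or.inl h
          · exact Or.inr (h ▸ d y List.mem_cons_self)
        · exact Or.inr h
      · have := pvUnvis_add hV hyV vis hyv
        simp only [List.length_cons] at g ⊢
        omega

-- the while-stack loop: visited only grows, stays inside V, and ends adjacency-closed
theorem pvDfs_spec (adj : PySem.Dict Int (List Int)) (hV : adj.keys.Nodup)
    (hvals : ∀ x y, y ∈ adj.getD x [] → y ∈ adj.keys) :
    ∀ (fuel : Nat) (stack : List Int) (vis : PySem.Set Int),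
      (∀ z ∈ stack, z ∈ vis) →
      (∀ z ∈ vis, z ∈ adj.keys) →
      (∀ z ∈ vis, z ∈ stack ∨ ∀ w ∈ adj.getD z [], w ∈ vis) →
      2 * pvUnvis adj.keys vis + stack.length ≤ fuel →
      (∀ z ∈ vis, z ∈ pvDfsB adj fuel stack vis) ∧
      (∀ z ∈ pvDfsB adj fuel stack vis, z ∈ adj.keys) ∧
      (∀ z ∈ pvDfsB adj fuel stack vis, ∀ w ∈ adj.getD z [], w ∈ pvDfsB adj fuel stack vis) := by
  intro fuel
  induction fuel with
  | zero =>
    intro stack vis h1 h2 h3 h4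
    match stack with
    | [] =>
      refine ⟨fun z h => h, h2, ?_⟩
      intro z hz w hw
      rcases h3 z hz with h | h
      · cases h
      · exact h w hw
    | x :: stack => simp at h4
  | succ fuel ih =>
    intro stack vis h1 h2 h3 h4
    match stack with
    | [] =>
      refine ⟨fun z h => h, h2, ?_⟩
      intro z hz w hw
      rcases h3 z hz with h | h
      · cases h
      · exact h w hw
    | x :: stack =>
      show _ ∧ _ ∧ _
      obtain ⟨a, b, c, d, e, f, g⟩ :=
        pvPush_spec hV (adj.getD x []) vis stack (fun y hy => hvals x y hy)
      set st := ((adj.getD x []).foldl (fun (st : PySem.Set Int × List Int) y =>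
          if y ∈ st.1 then st else (PySem.Set.add st.1 y, y :: st.2)) (vis, stack)) with hst
      have e1 : pvDfsB adj (fuel + 1) (x :: stack) vis = pvDfsB adj fuel st.2 st.1 := rfl
      rw [e1]
      have hx1 : ∀ z ∈ st.2, z ∈ st.1 := by
        intro z hz
        rcases e z hz with h | h
        · exact a z (h1 z (List.mem_cons_of_mem x h))
        · exact h
      have hx2 : ∀ z ∈ st.1, z ∈ adj.keys := by
        intro z hz
        rcases b z hz with h | h
        · exact h2 z h
        · exact hvals x z h
      have hx3 : ∀ z ∈ st.1, z ∈ st.2 ∨ ∀ w ∈ adj.getD z [], w ∈ st.1 := by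
        intro z hz
        rcases f z hz with hzv | hzs
        · rcases h3 z hzv with hzk | hcl
          · rcases List.mem_cons.mp hzk with h | h
            · subst h
              exact Or.inr (fun w hw => c w hw)
            · exact Or.inl (d z h)
          · exact Or.inr (fun w hw => a w (hcl w hw))
        · exact Or.inl hzs
      have hx4 : 2 * pvUnvis adj.keys st.1 + st.2.length ≤ fuel := by
        simp only [List.length_cons] at h4
        omega
      obtain ⟨r1, r2, r3⟩ := ih st.2 st.1 hx1 hx2 hx3 hx4
      exact ⟨fun z hz => r1 z (a z hz), r2, r3⟩

-- the component loop skips vertices that are already visited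
theorem pvOuter_skip (adj : PySem.Dict Int (List Int)) (fuel : Nat) :
    ∀ (l : List Int) (st : Int × PySem.Set Int), (∀ x ∈ l, x ∈ st.2) →
      l.foldl (fun (st : Int × PySem.Set Int) s =>
        if s ∈ st.2 then st
        else (st.1 + 1, pvDfsB adj fuel [s] (PySem.Set.add st.2 s))) st = st := by
  intro l
  induction l with
  | nil => intro st _; rfl
  | cons x l ih =>
    intro st h
    simp only [List.foldl_cons]
    rw [if_pos (h x List.mem_cons_self)]
    exact ih st (fun y hy => h y (List.mem_cons_of_mem x hy))

-- ===== VERDICT (by name: the statement is the Claim_ definition above) =====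
theorem reindex_edges_spec : Claim_equal_reindex_edges := by
  intro edges _hdom hpre
  obtain ⟨hself, hnd, hconn⟩ := hpre
  show reindex_edges edges = reindex_edges_alt edges
  -- the validation passes succeed
  have hchk : pvCheckA edges PySem.Set.empty = true :=
    pvCheckA_true edges PySem.Set.empty hself hnd (fun p _ h => List.not_mem_nil h)
  have hbuild : pvBuildB edges PySem.Set.empty PySem.Dict.empty =
      some (edges.foldl pvAdjStep PySem.Dict.empty) :=
    pvBuildB_some edges _ _ hself hnd (fun p _ h => List.not_mem_nil h)
  -- adjacency-dict invariants
  have hv0 : ∀ (x y : Int), y ∈ (PySem.Dict.empty : PySem.Dict Int (List Int)).getD x [] →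
      y ∈ (PySem.Dict.empty : PySem.Dict Int (List Int)).keys := by
    intro x y h
    rw [PySem.Dict.getD_empty] at h
    cases h
  obtain ⟨hK, hKnd, hVals⟩ := pvAdjFold_inv edges PySem.Dict.empty (by simp) hv0
  have hkeysV : (edges.foldl pvAdjStep PySem.Dict.empty).keys = pvVerts edges := by
    rw [hK, pvVerts_eq]; rfl
  -- the union-find fold
  have hstab0 : pvStab 0 ((pvVerts edges).foldl (fun d v => d.insert v v) PySem.Dict.empty) := by
    intro x
    show pvF _ x = x
    exact pvParent_id (pvVerts edges) PySem.Dict.empty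
      (fun y => by rw [pvF, PySem.Dict.getD_empty]) x
  obtain ⟨hstabN, hpresN, hedge⟩ :=
    pvFold_spec (edges.length + 1) edges
      ((pvVerts edges).foldl (fun d v => d.insert v v) PySem.Dict.empty) 0 hstab0 (by omega)
  rw [Nat.zero_add] at hstabN hpresN hedge
  -- every vertex has the same union-find root c
  have hrootc : ∀ v ∈ pvVerts edges,
      pvIter (edges.foldl (fun d p => pvUnionA (edges.length + 1) d p.1 p.2)
        ((pvVerts edges).foldl (fun d v => d.insert v v) PySem.Dict.empty)) edges.length v =
      pvIter (edges.foldl (fun d p => pvUnionA (edges.length + 1) d p.1 p.2)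
        ((pvVerts edges).foldl (fun d v => d.insert v v) PySem.Dict.empty)) edges.length
        ((pvVerts edges).headD 0) := by
    intro v hv
    refine pvClosure_pred (P := fun w => _ = _) ?_ (pvVerts edges).length _ ?_ v (hconn v hv)
    · intro p hp
      simp only [hedge p hp]
    · intro x hx
      rw [List.mem_singleton] at hx
      subst hx
      exact rfl
  have hroots := pvRoots_loop (show edges.length < edges.length + 1 by omega)
    (pvVerts edges) PySem.Set.empty _ hstabN (fun y => rfl) hrootc (Or.inl rfl)
  cases hVcase : pvVerts edges with
  | nil =>
    have hen : edges = [] := by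
      cases edges with
      | nil => rfl
      | cons p t =>
        exfalso
        have hmem : p.1 ∈ pvVerts (p :: t) :=
          (pvVerts_mem _ _).mpr ⟨p, List.mem_cons_self, Or.inl rfl⟩
        rw [hVcase] at hmem
        cases hmem
    subst hen
    rfl
  | cons s rest =>
    simp only [reindex_edges]
    rw [hchk]
    rw [if_neg (by simp)]
    rw [← pvVerts_eq]
    rw [if_neg (by rcases hroots with h | h <;> rw [h] <;> simp)]
    simp only [reindex_edges_alt, hbuild]
    rw [hkeysV, hVcase]
    -- B-side: the single DFS launch visits every vertex
    have hsK : s ∈ (List.foldl pvAdjStep PySem.Dict.empty edges).keys := by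
      rw [hkeysV, hVcase]; exact List.mem_cons_self
    have hmeas : 2 * pvUnvis (List.foldl pvAdjStep PySem.Dict.empty edges).keys [s] +
        ([s] : List Int).length ≤ 2 * (s :: rest).length + 2 := by
      have h1 := pvUnvis_le (List.foldl pvAdjStep PySem.Dict.empty edges).keys [s]
      have h2 : (List.foldl pvAdjStep PySem.Dict.empty edges).keys.length =
          (s :: rest).length := by rw [hkeysV, hVcase]
      simp only [List.length_cons, List.length_nil] at h1 h2 ⊢
      omega
    obtain ⟨hgrow, hinV, hclosed⟩ :=
      pvDfs_spec (List.foldl pvAdjStep PySem.Dict.empty edges) hKnd hVals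
        (2 * (s :: rest).length + 2) [s] [s]
        (fun z hz => hz)
        (fun z hz => by rw [List.mem_singleton.mp hz]; exact hsK)
        (fun z hz => Or.inl hz) hmeas
    have hiffB : ∀ p ∈ edges,
        (p.1 ∈ pvDfsB (List.foldl pvAdjStep PySem.Dict.empty edges)
            (2 * (s :: rest).length + 2) [s] [s] ↔
         p.2 ∈ pvDfsB (List.foldl pvAdjStep PySem.Dict.empty edges)
            (2 * (s :: rest).length + 2) [s] [s]) := by
      intro p hp
      have he := pvAdj_edge edges PySem.Dict.empty p hp
      exact ⟨fun h => hclosed p.1 h p.2 he.1, fun h => hclosed p.2 h p.1 he.2⟩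
    have hallV : ∀ v ∈ pvVerts edges,
        v ∈ pvDfsB (List.foldl pvAdjStep PySem.Dict.empty edges)
          (2 * (s :: rest).length + 2) [s] [s] := by
      intro v hv
      refine pvClosure_pred
        (P := fun w => w ∈ pvDfsB (List.foldl pvAdjStep PySem.Dict.empty edges)
          (2 * (s :: rest).length + 2) [s] [s]) hiffB _ _ ?_ v (hconn v hv)
      intro x hx
      rw [List.mem_singleton.mp hx, hVcase]
      exact hgrow s List.mem_cons_self
    -- reduce B's component loop: one launch, then every vertex is already visited
    rw [List.foldl_cons]
    rw [if_neg (show ¬ s ∈ ((0 : Int), (PySem.Set.empty : PySem.Set Int)).2 by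
      simp [PySem.Set.empty])]
    rw [show PySem.Set.add ((0 : Int), (PySem.Set.empty : PySem.Set Int)).2 s = [s] from rfl]
    rw [pvOuter_skip _ _ rest _ (show ∀ x ∈ rest,
        x ∈ (((0 : Int) + 1, pvDfsB (List.foldl pvAdjStep PySem.Dict.empty edges)
          (2 * (s :: rest).length + 2) [s] [s])).2 by
      intro x hx
      exact hallV x (by rw [hVcase]; exact List.mem_cons_of_mem s hx))]
    rw [if_neg (show ¬ (((0 : Int) + 1, pvDfsB (List.foldl pvAdjStep PySem.Dict.empty edges)
        (2 * (s :: rest).length + 2) [s] [s])).1 > 1 by norm_num)]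
    rw [PySem.List.length_sorted, List.length_map]
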